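-- pv_equiv track=rewrite | github.com/ZornsLemma/ozmoo | make-acorn.py | crunch_line
-- ===== SOURCE A (Python) =====
-- def crunch_line(line, crunched_symbols):
--     def crunch_symbol(symbol):
--         if symbol == "":
--             return ""
--         crunched_symbol = crunched_symbols.get(symbol, None)
--         if crunched_symbol is None:
--             i = len(crunched_symbols)
--             crunched_symbol = ""
--             while True:
--                 crunched_symbol += chr(ord("a") + (i % 26))
--                 i //= 26
--                 if i == 0:
--                     break
--             crunched_symbols[symbol] = crunched_symbol
--         return crunched_symbol
--     symbol = ""
--     result = ""
--     in_quote = False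
--     for c in line:
--         if c == '"':
--             in_quote = not in_quote
--         if not in_quote and ((c >= "a" and c <="z") or c == "_"):
--             symbol += c
--         else:
--             result += crunch_symbol(symbol) + c
--             symbol = ""
--     result += crunch_symbol(symbol)
--     return result
-- ===== SOURCE B (Python) =====
-- def crunch_line(line, crunched_symbols):
--     # Equivalent return value; also performs the same mutation of crunched_symbols.
--     def crunch(symbol):
--         if symbol == "":
--             return ""
--         got = crunched_symbols.get(symbol, None)
--         if got is None:
--             i = len(crunched_symbols)
--             got = ""
--             while True:
--                 got += chr(ord("a") + (i % 26))
--                 i //= 26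
--                 if i == 0:
--                     break
--             crunched_symbols[symbol] = got
--         return got
--
--     def is_sym(c):
--         return ("a" <= c <= "z") or c == "_"
--
--     def sub(seg):
--         # crunch every maximal run of [a-z_] in an outside-quotes segment
--         out = []
--         j = 0
--         while j < len(seg):
--             if is_sym(seg[j]):
--                 k = j
--                 while k < len(seg) and is_sym(seg[k]):
--                     k += 1
--                 out.append(crunch(seg[j:k]))
--                 j = k
--             else:
--                 out.append(seg[j])
--                 j += 1
--         return "".join(out)
--
--     def go(segs):
--         first = sub(segs[0])
--         if len(segs) == 1:
--             return first
--         if len(segs) == 2: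
--             return first + '"' + segs[1]
--         return first + '"' + segs[1] + '"' + go(segs[2:])
--
--     return go(line.split('"'))
-- ===== Notes on version B (the rewrite author's own statement) =====
-- stated objective: alternative
-- what changed: Replaces the char-by-char state machine (in_quote flag + pending-symbol accumulator) by a split on '"' into alternating outside/inside segments, emitting inside segments verbatim and crunching maximal [a-z_] runs per outside segment, then rejoining with '"'.
import Mathlib
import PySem

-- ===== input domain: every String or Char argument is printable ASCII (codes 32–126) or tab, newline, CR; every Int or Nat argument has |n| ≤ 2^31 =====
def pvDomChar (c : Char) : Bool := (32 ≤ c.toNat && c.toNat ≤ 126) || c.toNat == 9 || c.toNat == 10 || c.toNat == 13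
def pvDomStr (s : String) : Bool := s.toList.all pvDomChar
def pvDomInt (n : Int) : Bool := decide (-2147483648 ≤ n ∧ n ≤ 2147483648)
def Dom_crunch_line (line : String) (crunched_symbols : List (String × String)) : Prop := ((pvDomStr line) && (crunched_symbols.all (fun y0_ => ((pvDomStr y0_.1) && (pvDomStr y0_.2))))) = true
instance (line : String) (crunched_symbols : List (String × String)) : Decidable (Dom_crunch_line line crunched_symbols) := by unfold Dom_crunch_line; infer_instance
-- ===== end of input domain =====

-- B changes the decomposition (split on '"' + per-segment run crunching instead of a char-by-char
-- state machine); equivalence proved for the RETURN value — both Pythons also mutate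
-- crunched_symbols identically, but that side effect is not modelled here.

-- shared helper: the inner crunch_symbol (identical in A and B, which reuses it)
def pvGenSym (i : Nat) : List Char :=
  Char.ofNat (97 + i % 26) :: (if h : i / 26 = 0 then [] else pvGenSym (i / 26))
termination_by i
decreasing_by exact Nat.div_lt_self (Nat.pos_of_ne_zero (fun h0 => h (by simp [h0]))) (by omega)

def pvCrunchSym (d : PySem.Dict String String) (symbol : String) :
    String × PySem.Dict String String :=
  if symbol = "" then ("", d)
  else
    match d.get? symbol with
    | some cs => (cs, d)
    | none =>
      let cs := String.mk (pvGenSym d.size)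
      (cs, d.insert symbol cs)

def pvIsSym (c : Char) : Bool := ('a' ≤ c && c ≤ 'z') || c == '_'

-- ===== PORT A =====
def pvStepA (st : List Char × List Char × Bool × PySem.Dict String String) (c : Char) :
    List Char × List Char × Bool × PySem.Dict String String :=
  let (sym, res, inq, d) := st
  let inq := if c = '"' then !inq else inq
  if !inq && pvIsSym c then (sym ++ [c], res, inq, d)
  else
    let p := pvCrunchSym d (String.mk sym)
    ([], res ++ p.1.toList ++ [c], inq, p.2)

def crunch_line (line : String) (crunched_symbols : List (String × String)) : String :=
  let d0 := PySem.Dict.ofList crunched_symbols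
  let st := line.toList.foldl pvStepA ([], [], false, d0)
  String.mk (st.2.1 ++ (pvCrunchSym st.2.2.2 (String.mk st.1)).1.toList)

-- ===== PORT B =====
-- crunch every maximal run of [a-z_] in an outside-quotes segment (Source B's `sub`)
def pvSub (d : PySem.Dict String String) : List Char → List Char × PySem.Dict String String
  | [] => ([], d)
  | c :: rest =>
    if pvIsSym c then
      let run := c :: rest.takeWhile pvIsSym
      let p := pvCrunchSym d (String.mk run)
      let q := pvSub p.2 (rest.dropWhile pvIsSym)
      (p.1.toList ++ q.1, q.2)
    else
      let q := pvSub d rest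
      (c :: q.1, q.2)
termination_by l => l.length
decreasing_by
  · exact Nat.lt_succ_of_le (List.length_dropWhile_le _ _)
  · simp

-- Source B's `go`: first segment is outside quotes, next is inside (verbatim), recurse
def pvGo (d : PySem.Dict String String) : List (List Char) → List Char × PySem.Dict String String
  | [] => ([], d)
  | [s] => pvSub d s
  | [s0, s1] =>
    let p := pvSub d s0
    (p.1 ++ '"' :: s1, p.2)
  | s0 :: s1 :: s2 :: rest =>
    let p := pvSub d s0
    let q := pvGo p.2 (s2 :: rest)
    (p.1 ++ '"' :: s1 ++ '"' :: q.1, q.2)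

-- Python's line.split('"'), hand-ported (exact: maximal '"'-free chunks, empty chunks kept)
def pvSplitQ : List Char → List (List Char)
  | [] => [[]]
  | c :: rest =>
    if c = '"' then [] :: pvSplitQ rest
    else
      match pvSplitQ rest with
      | [] => [[c]]
      | a :: t => (c :: a) :: t

def crunch_line_alt (line : String) (crunched_symbols : List (String × String)) : String :=
  let d0 := PySem.Dict.ofList crunched_symbols
  String.mk (pvGo d0 (pvSplitQ line.toList)).1

-- ===== PRECONDITION & SPEC =====
def Spec_crunch_line (line : String) (crunched_symbols : List (String × String)) (out : String) : Prop := out = crunch_line_alt line crunched_symbols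
instance (line : String) (crunched_symbols : List (String × String)) (out : String) : Decidable (Spec_crunch_line line crunched_symbols out) := by unfold Spec_crunch_line; infer_instance

-- ===== CLAIM (what is proved, stated in full; the proofs are below) =====
def Claim_equal_crunch_line : Prop := ∀ (line : String) (crunched_symbols : List (String × String)), Dom_crunch_line line crunched_symbols → Spec_crunch_line line crunched_symbols (crunch_line line crunched_symbols)

-- ===== LEMMAS AND PROOFS =====

-- joins segments back with '"' (proof-only mirror of pvGo's traversal)
def pvJoinQ : List (List Char) → List Char
  | [] => []
  | [s] => s
  | s :: t => s ++ '"' :: pvJoinQ t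

theorem pvMkNil : String.mk ([] : List Char) = "" := rfl

theorem pvCrunchSym_empty (d : PySem.Dict String String) : pvCrunchSym d (String.mk []) = ("", d) := by
  simp [pvCrunchSym, pvMkNil]

theorem pvJoinQ_cons (s : List Char) (t : List (List Char)) (ht : t ≠ []) :
    pvJoinQ (s :: t) = s ++ '"' :: pvJoinQ t := by
  match t with
  | [] => exact absurd rfl ht
  | u :: v => rfl

-- the A-loop over an inside-quotes chunk just copies it
theorem foldA_inside (s : List Char) (res : List Char) (d : PySem.Dict String String)
    (hs : ∀ c ∈ s, c ≠ '"') :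
    List.foldl pvStepA ([], res, true, d) s = ([], res ++ s, true, d) := by
  induction s generalizing res with
  | nil => simp
  | cons c cs ih =>
    have hc : c ≠ '"' := hs c (by simp)
    simp only [List.foldl_cons]
    have hstep : pvStepA ([], res, true, d) c = ([], res ++ [c], true, d) := by
      simp [pvStepA, hc, pvCrunchSym_empty]
    rw [hstep, ih (res ++ [c]) (fun x hx => hs x (by simp [hx]))]
    simp

theorem takeWhile_all_append {p : Char → Bool} (u v : List Char) (c : Char)
    (hu : ∀ x ∈ u, p x = true) (hc : p c = false) :
    (u ++ c :: v).takeWhile p = u ∧ (u ++ c :: v).dropWhile p = c :: v := by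
  induction u with
  | nil => simp [List.takeWhile, List.dropWhile, hc]
  | cons a u ih =>
    have ha : p a = true := hu a (by simp)
    have := ih (fun x hx => hu x (by simp [hx]))
    simp [List.takeWhile, List.dropWhile, ha, this.1, this.2]

-- the A-loop over an outside-quotes chunk, with a pending symbol prefix
theorem foldA_outside (s : List Char) (sym res : List Char) (d : PySem.Dict String String)
    (hs : ∀ c ∈ s, c ≠ '"') (hsym : ∀ c ∈ sym, pvIsSym c = true) :
    ∃ sym' res' d',
      List.foldl pvStepA (sym, res, false, d) s = (sym', res', false, d') ∧
      (∀ c ∈ sym', pvIsSym c = true) ∧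
      res' ++ (pvCrunchSym d' (String.mk sym')).1.toList = res ++ (pvSub d (sym ++ s)).1 ∧
      (pvCrunchSym d' (String.mk sym')).2 = (pvSub d (sym ++ s)).2 := by
  induction s generalizing sym res d with
  | nil =>
    refine ⟨sym, res, d, by simp, hsym, ?_, ?_⟩ <;>
    · match hsymc : sym with
      | [] => simp [pvSub, pvCrunchSym_empty]
      | a :: u =>
        have ha : pvIsSym a = true := hsym a (by simp [hsymc])
        have hu : ∀ x ∈ u, pvIsSym x = true := fun x hx => hsym x (by simp [hsymc, hx])
        simp [pvSub, ha, List.takeWhile_eq_self_iff.mpr hu,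
          List.dropWhile_eq_nil_iff.mpr (fun x hx => hu x hx)]
  | cons c cs ih =>
    have hc : c ≠ '"' := hs c (by simp)
    have hcs : ∀ x ∈ cs, x ≠ '"' := fun x hx => hs x (by simp [hx])
    by_cases hcsym : pvIsSym c = true
    · have hstep : pvStepA (sym, res, false, d) c = (sym ++ [c], res, false, d) := by
        simp [pvStepA, hc, hcsym]
      have hsym' : ∀ x ∈ sym ++ [c], pvIsSym x = true := by
        intro x hx; rcases List.mem_append.mp hx with h | h
        · exact hsym x h
        · simp at h; simpa [h] using hcsym
      obtain ⟨sym', res', d', h1, h2, h3, h4⟩ := ih (sym ++ [c]) res d hcs hsym'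
      refine ⟨sym', res', d', by simpa [hstep] using h1, h2, ?_, ?_⟩
      · simpa [List.append_assoc] using h3
      · simpa [List.append_assoc] using h4
    · have hcf : pvIsSym c = false := by simpa using hcsym
      have hstep : pvStepA (sym, res, false, d) c =
          ([], res ++ (pvCrunchSym d (String.mk sym)).1.toList ++ [c], false,
            (pvCrunchSym d (String.mk sym)).2) := by
        simp [pvStepA, hc, hcf]
      have hsubeq : pvSub d (sym ++ c :: cs) =
          ((pvCrunchSym d (String.mk sym)).1.toList ++ c ::
             (pvSub (pvCrunchSym d (String.mk sym)).2 cs).1,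
           (pvSub (pvCrunchSym d (String.mk sym)).2 cs).2) := by
        match hsymc : sym with
        | [] => simp [pvSub, hcf, pvCrunchSym_empty]
        | a :: u =>
          have ha : pvIsSym a = true := hsym a (by simp [hsymc])
          have hu : ∀ x ∈ u, pvIsSym x = true := fun x hx => hsym x (by simp [hsymc, hx])
          obtain ⟨htw, hdw⟩ := takeWhile_all_append u (cs) c hu hcf
          simp [pvSub, ha, htw, hdw, hcf]
      obtain ⟨sym', res', d', h1, h2, h3, h4⟩ :=
        ih ([]) (res ++ (pvCrunchSym d (String.mk sym)).1.toList ++ [c])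
          (pvCrunchSym d (String.mk sym)).2 hcs (by simp)
      refine ⟨sym', res', d', ?_, h2, ?_, ?_⟩
      · simpa [hstep] using h1
      · rw [h3]; simp [hsubeq, List.append_assoc]
      · rw [h4]; simp [hsubeq]

-- the whole A-loop over joined segments computes pvGo
theorem foldA_join (segs : List (List Char)) :
    ∀ (d : PySem.Dict String String) (res : List Char),
    (∀ s ∈ segs, ∀ c ∈ s, c ≠ '"') →
    (List.foldl pvStepA ([], res, false, d) (pvJoinQ segs)).2.1 ++
      (pvCrunchSym (List.foldl pvStepA ([], res, false, d) (pvJoinQ segs)).2.2.2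
        (String.mk (List.foldl pvStepA ([], res, false, d) (pvJoinQ segs)).1)).1.toList
      = res ++ (pvGo d segs).1 ∧
    (pvCrunchSym (List.foldl pvStepA ([], res, false, d) (pvJoinQ segs)).2.2.2
        (String.mk (List.foldl pvStepA ([], res, false, d) (pvJoinQ segs)).1)).2
      = (pvGo d segs).2 := by
  intro d res hq
  match segs with
  | [] =>
    simp [pvJoinQ, pvGo, pvCrunchSym_empty]
  | [s] =>
    obtain ⟨sym', res', d', h1, h2, h3, h4⟩ :=
      foldA_outside s [] res d (hq s (by simp)) (by simp)
    rw [show pvJoinQ [s] = s from rfl, h1]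
    refine ⟨?_, ?_⟩
    · simpa [pvGo] using h3
    · simpa [pvGo] using h4
  | [s0, s1] =>
    obtain ⟨sym', res', d', h1, h2, h3, h4⟩ :=
      foldA_outside s0 [] res d (hq s0 (by simp)) (by simp)
    have hjoin : pvJoinQ [s0, s1] = s0 ++ '"' :: s1 := rfl
    have hstep : pvStepA (sym', res', false, d') '"' =
        ([], res' ++ (pvCrunchSym d' (String.mk sym')).1.toList ++ ['"'], true,
          (pvCrunchSym d' (String.mk sym')).2) := by
      simp [pvStepA, pvIsSym]
    rw [hjoin, List.foldl_append, h1, List.foldl_cons, hstep, h3, h4,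
      foldA_inside s1 _ _ (hq s1 (by simp))]
    simp [pvGo, pvCrunchSym_empty]
  | s0 :: s1 :: s2 :: rest =>
    obtain ⟨sym', res', d', h1, h2, h3, h4⟩ :=
      foldA_outside s0 [] res d (hq s0 (by simp)) (by simp)
    have hjoin : pvJoinQ (s0 :: s1 :: s2 :: rest) =
        s0 ++ '"' :: (s1 ++ '"' :: pvJoinQ (s2 :: rest)) := by
      rw [pvJoinQ_cons _ _ (by simp), pvJoinQ_cons _ _ (by simp)]
    have hstep : pvStepA (sym', res', false, d') '"' =
        ([], res' ++ (pvCrunchSym d' (String.mk sym')).1.toList ++ ['"'], true,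
          (pvCrunchSym d' (String.mk sym')).2) := by
      simp [pvStepA, pvIsSym]
    have hstep2 : ∀ (R : List Char) (dd : PySem.Dict String String),
        pvStepA ([], R, true, dd) '"' = ([], R ++ ['"'], false, dd) := by
      intro R dd; simp [pvStepA, pvIsSym, pvCrunchSym_empty]
    have ih := foldA_join (s2 :: rest) (pvSub d ([] ++ s0)).2
      (res ++ (pvSub d ([] ++ s0)).1 ++ ['"'] ++ s1 ++ ['"'])
      (fun s hs => hq s (by simp [hs]))
    rw [hjoin, List.foldl_append, h1, List.foldl_cons, hstep, h3, h4,
      List.foldl_append, foldA_inside s1 _ _ (hq s1 (by simp)), List.foldl_cons,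
      hstep2] at *
    refine ⟨?_, ?_⟩
    · rw [ih.1]; simp [pvGo]
    · rw [ih.2]; simp [pvGo]

theorem splitQ_ne_nil (l : List Char) : pvSplitQ l ≠ [] := by
  induction l with
  | nil => simp [pvSplitQ]
  | cons c rest ih =>
    by_cases hc : c = '"'
    · simp [pvSplitQ, hc]
    · rw [pvSplitQ, if_neg hc]
      match h : pvSplitQ rest with
      | [] => simp
      | a :: t => simp

theorem splitQ_no_quote (l : List Char) :
    ∀ s ∈ pvSplitQ l, ∀ c ∈ s, c ≠ '"' := by
  induction l with
  | nil => simp [pvSplitQ]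
  | cons c rest ih =>
    by_cases hc : c = '"'
    · rw [pvSplitQ, if_pos hc]
      intro s hs x hx
      rcases List.mem_cons.mp hs with h | h
      · subst h; simp at hx
      · exact ih s h x hx
    · rw [pvSplitQ, if_neg hc]
      match h : pvSplitQ rest with
      | [] =>
        intro s hs x hx
        simp at hs
        subst hs
        simp at hx
        simpa [hx] using hc
      | a :: t =>
        intro s hs x hx
        rcases List.mem_cons.mp hs with h1 | h1
        · subst h1
          rcases List.mem_cons.mp hx with h2 | h2
          · simpa [h2] using hc
          · exact ih a (by simp [h]) x h2
        · exact ih s (by simp [h, h1]) x hx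

theorem joinQ_cons_cons (c : Char) (a : List Char) (t : List (List Char)) :
    pvJoinQ ((c :: a) :: t) = c :: pvJoinQ (a :: t) := by
  match t with
  | [] => rfl
  | u :: v => rfl

theorem joinQ_splitQ (l : List Char) : pvJoinQ (pvSplitQ l) = l := by
  induction l with
  | nil => rfl
  | cons c rest ih =>
    by_cases hc : c = '"'
    · rw [pvSplitQ, if_pos hc, pvJoinQ_cons _ _ (splitQ_ne_nil rest), ih, hc]
      rfl
    · rw [pvSplitQ, if_neg hc]
      match h : pvSplitQ rest with
      | [] => exact absurd h (splitQ_ne_nil rest)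
      | a :: t =>
        rw [joinQ_cons_cons, ← h, ih]

theorem crunch_line_spec : Claim_equal_crunch_line := by
  intro line cs _
  have h := foldA_join (pvSplitQ line.toList) (PySem.Dict.ofList cs) []
    (splitQ_no_quote line.toList)
  rw [joinQ_splitQ] at h
  show String.mk
      ((List.foldl pvStepA ([], [], false, PySem.Dict.ofList cs) line.toList).2.1 ++
        (pvCrunchSym (List.foldl pvStepA ([], [], false, PySem.Dict.ofList cs) line.toList).2.2.2
          (String.mk (List.foldl pvStepA ([], [], false, PySem.Dict.ofList cs) line.toList).1)).1.toList)
      = String.mk (pvGo (PySem.Dict.ofList cs) (pvSplitQ line.toList)).1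
  rw [h.1]
  simp
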